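-- pv_equiv track=rewrite | github.com/neilzhangpro/JobFit_AI | backend/optimization/infrastructure/agents/resume_rewriter.py | _sections_from_resume_sections
-- ===== SOURCE A (Python) =====
-- from typing import Any
--
-- _SECTION_KEYS = ("experience", "skills_summary", "projects")
--
-- def _sections_from_resume_sections(sections: list[dict[str, Any]]) -> str:
--     """Format resume_sections (from state) as content by section."""
--     by_section: dict[str, list[str]] = {}
--     for s in sections:
--         if not isinstance(s, dict):
--             continue
--         st = (s.get("type") or s.get("section_type") or "other").strip() or "other"
--         if st == "skills":
--             st = "skills_summary"
--         content = (s.get("content") or "").strip()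
--         if content:
--             if st not in by_section:
--                 by_section[st] = []
--             by_section[st].append(content)
--
--     lines: list[str] = []
--     for key in _SECTION_KEYS:
--         if key in by_section and by_section[key]:
--             lines.append(f"### {key.replace('_', ' ').title()}")
--             for block in by_section[key]:
--                 lines.append(block)
--             lines.append("")
--     return "\n".join(lines).strip() if lines else ""
-- ===== SOURCE B (Python) =====
-- _SECTION_KEYS = ("experience", "skills_summary", "projects")
--
-- def _sections_from_resume_sections(sections):
--     """Format resume_sections (from state) as content by section."""
--     lines = []
--     for key, title in (("experience", "Experience"),
--                        ("skills_summary", "Skills Summary"),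
--                        ("projects", "Projects")):
--         blocks = []
--         for s in sections:
--             if not isinstance(s, dict):
--                 continue
--             st = (s.get("type") or s.get("section_type") or "other").strip() or "other"
--             if st == "skills":
--                 st = "skills_summary"
--             if st != key:
--                 continue
--             content = (s.get("content") or "").strip()
--             if content:
--                 blocks.append(content)
--         if blocks:
--             lines.append(f"### {title}")
--             lines.extend(blocks)
--             lines.append("")
--     return "\n".join(lines).strip() if lines else ""
-- ===== Notes on version B (the rewrite author's own statement) =====
-- stated objective: simpler
-- what changed: B drops the by_section dict entirely: it loops over the three (key, title) pairs with hardcoded titles and rescans the sections list per key collecting matching content, instead of building a dict in one pass and then looking the keys up.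
import Mathlib
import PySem

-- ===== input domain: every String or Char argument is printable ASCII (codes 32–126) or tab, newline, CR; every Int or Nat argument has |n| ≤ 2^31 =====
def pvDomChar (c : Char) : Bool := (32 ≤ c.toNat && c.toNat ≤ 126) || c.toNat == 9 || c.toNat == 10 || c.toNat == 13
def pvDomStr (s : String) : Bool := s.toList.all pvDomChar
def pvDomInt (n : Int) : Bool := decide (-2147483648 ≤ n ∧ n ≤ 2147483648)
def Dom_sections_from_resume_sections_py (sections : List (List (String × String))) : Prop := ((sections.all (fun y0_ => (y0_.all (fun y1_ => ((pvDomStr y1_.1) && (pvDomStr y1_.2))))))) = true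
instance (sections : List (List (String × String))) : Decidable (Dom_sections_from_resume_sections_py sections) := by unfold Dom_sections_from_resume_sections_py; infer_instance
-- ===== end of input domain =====

-- B replaces A's by_section dict with one in-order rescan of the sections list per fixed key
-- (hardcoded titles): simpler, no dict, same return value.


-- ===== PORT A =====
-- shared normalization, the literal Python expression
-- st = (s.get("type") or s.get("section_type") or "other").strip() or "other"; 'skills' -> 'skills_summary'
def pvSecType (s : List (String × String)) : String :=
  let t1 := ((PySem.Dict.mk s).get? "type").getD ""
  let t2 := if t1 ≠ "" then t1 else ((PySem.Dict.mk s).get? "section_type").getD ""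
  let t3 := if t2 ≠ "" then t2 else "other"
  let st := if PySem.Str.strip t3 ≠ "" then PySem.Str.strip t3 else "other"
  if st = "skills" then "skills_summary" else st

-- content = (s.get("content") or "").strip()
def pvSecContent (s : List (String × String)) : String :=
  PySem.Str.strip (((PySem.Dict.mk s).get? "content").getD "")

-- str.title(): hand port, exact on the ASCII domain (where 'cased' = alphabetic)
def pvTitleAux : Bool → List Char → List Char
  | _, [] => []
  | prev, c :: rest =>
    (if PySem.Chars.isalpha c then (if prev then PySem.Chars.lowerChar c else PySem.Chars.upperChar c) else c)
      :: pvTitleAux (PySem.Chars.isalpha c) rest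

def pvTitle (s : String) : String := String.ofList (pvTitleAux false s.toList)

def sections_from_resume_sections_py (sections : List (List (String × String))) : String :=
  let bySection : PySem.Dict String (List String) :=
    sections.foldl (fun d s =>
      let st := pvSecType s
      let content := pvSecContent s
      if content ≠ "" then
        let d' := if d.contains st then d else d.insert st []
        d'.modify st [] (fun l => l ++ [content])
      else d) PySem.Dict.empty
  let lines : List String :=
    ["experience", "skills_summary", "projects"].foldl (fun lines key =>
      if bySection.contains key ∧ bySection.getD key [] ≠ [] then
        ((lines ++ ["### " ++ pvTitle (PySem.Str.replace key "_" " ")]) ++ bySection.getD key []) ++ [""]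
      else lines) []
  if lines ≠ [] then PySem.Str.strip (PySem.Str.join "\n" lines) else ""

-- ===== PORT B =====
def sections_from_resume_sections_py_alt (sections : List (List (String × String))) : String :=
  let lines : List String :=
    [("experience", "Experience"), ("skills_summary", "Skills Summary"), ("projects", "Projects")].foldl
      (fun lines kt =>
        let blocks : List String :=
          sections.foldl (fun blocks s =>
            let st := pvSecType s
            if st ≠ kt.1 then blocks
            else
              let content := pvSecContent s
              if content ≠ "" then blocks ++ [content] else blocks) []
        if blocks ≠ [] then ((lines ++ ["### " ++ kt.2]) ++ blocks) ++ [""] else lines) []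
  if lines ≠ [] then PySem.Str.strip (PySem.Str.join "\n" lines) else ""

-- ===== PRECONDITION & SPEC =====
-- Pre_ only requires that the keys this function reads ("type", "section_type", "content") are
-- not repeated within a section, as in every Python dict: a repeated key corresponds to no Python input.
def Pre_sections_from_resume_sections_py (sections : List (List (String × String))) : Prop :=
  ∀ s ∈ sections, (s.map Prod.fst).count "type" ≤ 1 ∧ (s.map Prod.fst).count "section_type" ≤ 1
    ∧ (s.map Prod.fst).count "content" ≤ 1
instance (sections : List (List (String × String))) : Decidable (Pre_sections_from_resume_sections_py sections) := by unfold Pre_sections_from_resume_sections_py; infer_instance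

def pvWitness_sections_from_resume_sections_py : (List (List (String × String))) :=
  [[("type", "experience"), ("content", "Led the backend team.")],
   [("type", "skills"), ("content", "Python, SQL")],
   [("section_type", "projects"), ("content", "JobFit AI")],
   [("type", "summary"), ("content", "ignored")]]

def Spec_sections_from_resume_sections_py (sections : List (List (String × String))) (out : String) : Prop := out = sections_from_resume_sections_py_alt sections
instance (sections : List (List (String × String))) (out : String) : Decidable (Spec_sections_from_resume_sections_py sections out) := by unfold Spec_sections_from_resume_sections_py; infer_instance

-- ===== CLAIM (what is proved, stated in full; the proofs are below) =====
def Claim_equal_sections_from_resume_sections_py : Prop := ∀ (sections : List (List (String × String))), Dom_sections_from_resume_sections_py sections → Pre_sections_from_resume_sections_py sections → Spec_sections_from_resume_sections_py sections (sections_from_resume_sections_py sections)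

-- ===== LEMMAS AND PROOFS =====

-- A's loop body, named for the proofs (definitionally the lambda in port A)
def pvStepA (d : PySem.Dict String (List String)) (s : List (String × String)) :
    PySem.Dict String (List String) :=
  let st := pvSecType s
  let content := pvSecContent s
  if content ≠ "" then
    let d' := if d.contains st then d else d.insert st []
    d'.modify st [] (fun l => l ++ [content])
  else d

-- the content blocks collected for one key, in order
def pvBlocks (k : String) (sections : List (List (String × String))) : List String :=
  (sections.filter (fun s => pvSecType s == k && pvSecContent s != "")).map pvSecContent

theorem pvStepA_of_empty (d : PySem.Dict String (List String)) (s : List (String × String))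
    (h2 : pvSecContent s = "") : pvStepA d s = d := by
  unfold pvStepA
  rw [if_neg (by simp [h2])]

theorem pvStepA_eq (d : PySem.Dict String (List String)) (s : List (String × String))
    (h2 : pvSecContent s ≠ "") :
    pvStepA d s = (if d.contains (pvSecType s) then d else d.insert (pvSecType s) []).modify
        (pvSecType s) [] (fun l => l ++ [pvSecContent s]) := by
  unfold pvStepA
  rw [if_pos h2]

theorem pvStepA_getD (d : PySem.Dict String (List String)) (s : List (String × String))
    (h2 : pvSecContent s ≠ "") (k : String) :
    (pvStepA d s).getD k []
      = d.getD k [] ++ (if pvSecType s = k then [pvSecContent s] else []) := by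
  rw [pvStepA_eq d s h2, PySem.Dict.getD_modify]
  by_cases h1 : k = pvSecType s
  · rw [if_pos h1, if_pos (Eq.symm h1)]
    by_cases hc : d.contains (pvSecType s)
    · rw [if_pos hc, h1]
    · rw [if_neg hc, PySem.Dict.getD_insert, if_pos rfl, h1]
      simp [PySem.Dict.getD_of_not_contains d ([] : List String) (by simpa using hc)]
  · have h1' : ¬ pvSecType s = k := fun h => h1 (Eq.symm h)
    rw [if_neg h1, if_neg h1']
    by_cases hc : d.contains (pvSecType s)
    · rw [if_pos hc]; simp
    · rw [if_neg hc, PySem.Dict.getD_insert, if_neg h1]; simp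

theorem pvStepA_contains (d : PySem.Dict String (List String)) (s : List (String × String))
    (h2 : pvSecContent s ≠ "") (k : String) :
    (pvStepA d s).contains k = (k == pvSecType s || d.contains k) := by
  rw [pvStepA_eq d s h2, PySem.Dict.contains_modify]
  by_cases hc : d.contains (pvSecType s)
  · rw [if_pos hc]
  · rw [if_neg hc, PySem.Dict.contains_insert]
    simp

theorem pvBlocks_cons (k : String) (s : List (String × String))
    (rest : List (List (String × String))) :
    pvBlocks k (s :: rest)
      = if pvSecType s = k ∧ pvSecContent s ≠ "" then pvSecContent s :: pvBlocks k rest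
        else pvBlocks k rest := by
  simp only [pvBlocks, List.filter_cons]
  by_cases h1 : pvSecType s = k
  · by_cases h2 : pvSecContent s = "" <;> simp [h1, h2]
  · simp [h1]

theorem pvA_getD (k : String) (sections : List (List (String × String)))
    (d : PySem.Dict String (List String)) :
    (sections.foldl pvStepA d).getD k [] = d.getD k [] ++ pvBlocks k sections := by
  induction sections generalizing d with
  | nil => simp [pvBlocks]
  | cons s rest ih =>
      rw [List.foldl_cons, ih, pvBlocks_cons]
      by_cases h2 : pvSecContent s = ""
      · simp [pvStepA_of_empty d s h2, h2]
      · rw [pvStepA_getD d s h2 k]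
        by_cases h1 : pvSecType s = k <;> simp [h1, h2]

theorem pvA_contains (k : String) (sections : List (List (String × String)))
    (d : PySem.Dict String (List String)) :
    (sections.foldl pvStepA d).contains k
      = (d.contains k || decide (pvBlocks k sections ≠ [])) := by
  induction sections generalizing d with
  | nil => simp [pvBlocks]
  | cons s rest ih =>
      rw [List.foldl_cons, ih, pvBlocks_cons]
      by_cases h2 : pvSecContent s = ""
      · simp [pvStepA_of_empty d s h2, h2]
      · rw [pvStepA_contains d s h2 k]
        by_cases h1 : pvSecType s = k
        · simp [h1, h2]
        · have hb : (k == pvSecType s) = false := beq_eq_false_iff_ne.mpr (fun h => h1 (Eq.symm h))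
          simp [h1, hb]

-- B's inner scan collects exactly pvBlocks
theorem pvB_inner (k : String) (sections : List (List (String × String))) :
    sections.foldl (fun blocks s =>
      let st := pvSecType s
      if st ≠ k then blocks
      else
        let content := pvSecContent s
        if content ≠ "" then blocks ++ [content] else blocks) []
    = pvBlocks k sections := by
  have hfun : (fun (blocks : List String) (s : List (String × String)) =>
      let st := pvSecType s
      if st ≠ k then blocks
      else
        let content := pvSecContent s
        if content ≠ "" then blocks ++ [content] else blocks)
    = (fun acc s => if (pvSecType s == k && pvSecContent s != "") = true
        then acc ++ [pvSecContent s] else acc) := by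
    funext blocks s
    by_cases h1 : pvSecType s = k
    · by_cases h2 : pvSecContent s = "" <;> simp [h1, h2]
    · simp [h1]
  rw [hfun, PySem.List.foldl_append_if]
  simp [pvBlocks]

-- ===== VERDICT (by name: the statement is the Claim_ definition above) =====
theorem sections_from_resume_sections_py_spec : Claim_equal_sections_from_resume_sections_py := by
  intro sections _ _
  unfold Spec_sections_from_resume_sections_py
  unfold sections_from_resume_sections_py sections_from_resume_sections_py_alt
  have eA : (fun (d : PySem.Dict String (List String)) (s : List (String × String)) =>
      let st := pvSecType s
      let content := pvSecContent s
      if content ≠ "" then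
        let d' := if d.contains st then d else d.insert st []
        d'.modify st [] (fun l => l ++ [content])
      else d) = pvStepA := rfl
  rw [eA]
  simp only [List.foldl, pvB_inner]
  have hg : ∀ k, (sections.foldl pvStepA PySem.Dict.empty).getD k [] = pvBlocks k sections := by
    intro k; simpa using pvA_getD k sections PySem.Dict.empty
  have hc : ∀ k, (sections.foldl pvStepA PySem.Dict.empty).contains k
      = decide (pvBlocks k sections ≠ []) := by
    intro k; simpa using pvA_contains k sections PySem.Dict.empty
  simp only [hg, hc]
  have t1 : "### " ++ pvTitle (PySem.Str.replace "experience" "_" " ") = "### " ++ "Experience" := by decide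
  have t2 : "### " ++ pvTitle (PySem.Str.replace "skills_summary" "_" " ") = "### " ++ "Skills Summary" := by decide
  have t3 : "### " ++ pvTitle (PySem.Str.replace "projects" "_" " ") = "### " ++ "Projects" := by decide
  rw [t1, t2, t3]
  by_cases b1 : pvBlocks "experience" sections = [] <;>
    by_cases b2 : pvBlocks "skills_summary" sections = [] <;>
      by_cases b3 : pvBlocks "projects" sections = [] <;>
        simp [b1, b2, b3]
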